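-- pv_equiv track=rewrite | github.com/autorevai/getclearance | backend/app/services/screening.py | _get_primary_source
-- ===== SOURCE A (Python) =====
-- def _get_primary_source(datasets: list[str]) -> str:
--     """Get the primary/most authoritative source from datasets."""
--     # Priority order for sources
--     priority = [
--         "us_ofac_sdn",
--         "eu_fsf",
--         "un_sc_sanctions",
--         "gb_hmt_sanctions",
--         "opensanctions",
--     ]
--
--     for source in priority:
--         if source in datasets:
--             return source
--
--     return datasets[0] if datasets else "opensanctions"
-- ===== SOURCE B (Python) =====
-- def _get_primary_source(datasets: list[str]) -> str:
--     """Get the primary/most authoritative source from datasets."""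
--     priority = [
--         "us_ofac_sdn",
--         "eu_fsf",
--         "un_sc_sanctions",
--         "gb_hmt_sanctions",
--         "opensanctions",
--     ]
--     rank = {src: i for i, src in enumerate(priority)}
--     n = len(priority)
--     best = n
--     for s in datasets:
--         r = rank.get(s, n)
--         if r < best:
--             best = r
--     if best < n:
--         return priority[best]
--     return datasets[0] if datasets else "opensanctions"
-- ===== Notes on version B (the rewrite author's own statement) =====
-- stated objective: alternative
-- what changed: Instead of scanning datasets once per priority source (membership test per source), B builds a source-to-rank dict once and makes a single pass over datasets maintaining the minimum rank seen, then indexes the priority list.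
import Mathlib
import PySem

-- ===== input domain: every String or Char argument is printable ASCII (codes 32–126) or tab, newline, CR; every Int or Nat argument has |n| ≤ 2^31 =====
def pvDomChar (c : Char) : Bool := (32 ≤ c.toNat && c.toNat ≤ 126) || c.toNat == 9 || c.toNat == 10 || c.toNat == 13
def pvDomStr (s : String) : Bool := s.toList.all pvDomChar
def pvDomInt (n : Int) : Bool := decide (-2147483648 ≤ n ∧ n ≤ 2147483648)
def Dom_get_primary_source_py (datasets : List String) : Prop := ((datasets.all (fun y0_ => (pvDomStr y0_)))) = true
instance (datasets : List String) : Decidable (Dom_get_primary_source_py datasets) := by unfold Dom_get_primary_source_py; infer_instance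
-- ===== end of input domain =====

-- B replaces A's per-source membership scans by a rank dict and one pass over datasets keeping the minimum rank (alternative single-pass decomposition).


-- ===== PORT A =====
-- the priority list of A (and B)
def pvPriority : List String :=
  ["us_ofac_sdn", "eu_fsf", "un_sc_sanctions", "gb_hmt_sanctions", "opensanctions"]

-- A's 'for source in priority: if source in datasets: return source' as structural recursion over priority
def pvLoopA (datasets : List String) : List String → Option String
  | [] => none
  | p :: rest => if p ∈ datasets then some p else pvLoopA datasets rest

def get_primary_source_py (datasets : List String) : String :=
  match pvLoopA datasets pvPriority with
  | some s => s
  | none => match datasets with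
            | [] => "opensanctions"
            | d :: _ => d

-- ===== PORT B =====
-- rank = {src: i for i, src in enumerate(priority)}
def pvRank : PySem.Dict String Nat :=
  PySem.Dict.ofList [("us_ofac_sdn", 0), ("eu_fsf", 1), ("un_sc_sanctions", 2), ("gb_hmt_sanctions", 3), ("opensanctions", 4)]

-- r = rank.get(s, n)
def pvRankOf (s : String) : Nat := PySem.Dict.getD pvRank s pvPriority.length

-- the body of B's 'for s in datasets' loop: if r < best: best = r
def pvStep (b : Nat) (s : String) : Nat := if pvRankOf s < b then pvRankOf s else b

def get_primary_source_py_alt (datasets : List String) : String :=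
  if datasets.foldl pvStep pvPriority.length < pvPriority.length then
    pvPriority.getD (datasets.foldl pvStep pvPriority.length) "opensanctions"
  else match datasets with
       | [] => "opensanctions"
       | d :: _ => d

-- ===== PRECONDITION & SPEC =====
def Spec_get_primary_source_py (datasets : List String) (out : String) : Prop := out = get_primary_source_py_alt datasets
instance (datasets : List String) (out : String) : Decidable (Spec_get_primary_source_py datasets out) := by unfold Spec_get_primary_source_py; infer_instance

-- ===== CLAIM (what is proved, stated in full; the proofs are below) =====
def Claim_equal_get_primary_source_py : Prop := ∀ (datasets : List String), Dom_get_primary_source_py datasets → Spec_get_primary_source_py datasets (get_primary_source_py datasets)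

-- ===== LEMMAS AND PROOFS =====

lemma pvFold_le_init (l : List String) (b : Nat) : l.foldl pvStep b ≤ b := by
  induction l generalizing b with
  | nil => simp
  | cons x xs ih =>
    simp only [List.foldl]
    refine le_trans (ih _) ?_
    unfold pvStep; split <;> omega

lemma pvFold_le_mem (l : List String) (b : Nat) (s : String) :
    s ∈ l → l.foldl pvStep b ≤ pvRankOf s := by
  induction l generalizing b with
  | nil => intro h; cases h
  | cons x xs ih =>
    intro hs
    simp only [List.foldl]
    rcases List.mem_cons.mp hs with h | h
    · subst h
      refine le_trans (pvFold_le_init xs _) ?_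
      unfold pvStep; split <;> omega
    · exact ih _ h

lemma pvFold_cases (l : List String) (b : Nat) :
    l.foldl pvStep b = b ∨ ∃ s ∈ l, l.foldl pvStep b = pvRankOf s := by
  induction l generalizing b with
  | nil => left; rfl
  | cons x xs ih =>
    simp only [List.foldl]
    rcases ih (pvStep b x) with h | ⟨s, hs, h⟩
    · by_cases hx : pvRankOf x < b
      · right
        refine ⟨x, List.mem_cons_self, ?_⟩
        rw [h]; unfold pvStep; simp [hx]
      · left
        rw [h]; unfold pvStep; simp [hx]
    · right; exact ⟨s, List.mem_cons_of_mem _ hs, h⟩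

-- characterisation of the rank dict: outside the five priority strings the default rank 5 applies
lemma pvRankOf_eq_five (s : String) (h0 : ¬ s = "us_ofac_sdn") (h1 : ¬ s = "eu_fsf")
    (h2 : ¬ s = "un_sc_sanctions") (h3 : ¬ s = "gb_hmt_sanctions") (h4 : ¬ s = "opensanctions") :
    pvRankOf s = 5 := by
  have hit : pvRank.items = [("us_ofac_sdn", 0), ("eu_fsf", 1), ("un_sc_sanctions", 2), ("gb_hmt_sanctions", 3), ("opensanctions", 4)] := by decide
  have b0 : ("us_ofac_sdn" == s) = false := beq_eq_false_iff_ne.mpr (fun e => h0 e.symm)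
  have b1 : ("eu_fsf" == s) = false := beq_eq_false_iff_ne.mpr (fun e => h1 e.symm)
  have b2 : ("un_sc_sanctions" == s) = false := beq_eq_false_iff_ne.mpr (fun e => h2 e.symm)
  have b3 : ("gb_hmt_sanctions" == s) = false := beq_eq_false_iff_ne.mpr (fun e => h3 e.symm)
  have b4 : ("opensanctions" == s) = false := beq_eq_false_iff_ne.mpr (fun e => h4 e.symm)
  simp [pvRankOf, PySem.Dict.getD, PySem.Dict.get?, hit, List.find?, pvPriority, b0, b1, b2, b3, b4]

-- a rank < 5 identifies the string
lemma pvRankOf_char (s : String) :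
    (pvRankOf s = 0 → s = "us_ofac_sdn") ∧ (pvRankOf s = 1 → s = "eu_fsf") ∧
    (pvRankOf s = 2 → s = "un_sc_sanctions") ∧ (pvRankOf s = 3 → s = "gb_hmt_sanctions") ∧
    (pvRankOf s = 4 → s = "opensanctions") := by
  by_cases h0 : s = "us_ofac_sdn"
  · subst h0; decide
  by_cases h1 : s = "eu_fsf"
  · subst h1; decide
  by_cases h2 : s = "un_sc_sanctions"
  · subst h2; decide
  by_cases h3 : s = "gb_hmt_sanctions"
  · subst h3; decide
  by_cases h4 : s = "opensanctions"
  · subst h4; decide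
  simp [pvRankOf_eq_five s h0 h1 h2 h3 h4]

lemma pvRankOf_lit :
    pvRankOf "us_ofac_sdn" = 0 ∧ pvRankOf "eu_fsf" = 1 ∧ pvRankOf "un_sc_sanctions" = 2 ∧
    pvRankOf "gb_hmt_sanctions" = 3 ∧ pvRankOf "opensanctions" = 4 := by decide

lemma pvBest_eq (datasets : List String) (i : Nat) (hi : i < 5)
    (hmem : pvPriority.getD i "" ∈ datasets)
    (hnot : ∀ j, j < i → pvPriority.getD j "" ∉ datasets) :
    datasets.foldl pvStep pvPriority.length = i := by
  obtain ⟨r0, r1, r2, r3, r4⟩ := pvRankOf_lit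
  have hle : datasets.foldl pvStep pvPriority.length ≤ i := by
    refine le_trans (pvFold_le_mem datasets _ _ hmem) ?_
    interval_cases i <;> simp_all [pvPriority]
  have hge : i ≤ datasets.foldl pvStep pvPriority.length := by
    rcases pvFold_cases datasets pvPriority.length with h | ⟨s, hs, h⟩
    · rw [h]; simp [pvPriority]; omega
    · by_contra hlt
      rw [not_le] at hlt
      obtain ⟨c0, c1, c2, c3, c4⟩ := pvRankOf_char s
      have hr : pvRankOf s < i := by omega
      have hr5 : pvRankOf s < 5 := by omega
      interval_cases hv : (pvRankOf s)
      · exact hnot 0 (by omega) (by rw [show pvPriority.getD 0 "" = s from by simp [pvPriority, c0 rfl]]; exact hs)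
      · exact hnot 1 (by omega) (by rw [show pvPriority.getD 1 "" = s from by simp [pvPriority, c1 rfl]]; exact hs)
      · exact hnot 2 (by omega) (by rw [show pvPriority.getD 2 "" = s from by simp [pvPriority, c2 rfl]]; exact hs)
      · exact hnot 3 (by omega) (by rw [show pvPriority.getD 3 "" = s from by simp [pvPriority, c3 rfl]]; exact hs)
      · exact hnot 4 (by omega) (by rw [show pvPriority.getD 4 "" = s from by simp [pvPriority, c4 rfl]]; exact hs)
  omega

lemma pvBest_none (datasets : List String)
    (hnot : ∀ j, j < 5 → pvPriority.getD j "" ∉ datasets) :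
    datasets.foldl pvStep pvPriority.length = 5 := by
  rcases pvFold_cases datasets pvPriority.length with h | ⟨s, hs, h⟩
  · simpa [pvPriority] using h
  · rw [h]
    obtain ⟨c0, c1, c2, c3, c4⟩ := pvRankOf_char s
    by_contra hne
    have hle : pvRankOf s ≤ 5 := by
      have := pvFold_le_init datasets pvPriority.length
      rw [h] at this; simpa [pvPriority] using this
    have hr5 : pvRankOf s < 5 := by omega
    interval_cases hv : (pvRankOf s)
    · exact hnot 0 (by omega) (by rw [show pvPriority.getD 0 "" = s from by simp [pvPriority, c0 rfl]]; exact hs)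
    · exact hnot 1 (by omega) (by rw [show pvPriority.getD 1 "" = s from by simp [pvPriority, c1 rfl]]; exact hs)
    · exact hnot 2 (by omega) (by rw [show pvPriority.getD 2 "" = s from by simp [pvPriority, c2 rfl]]; exact hs)
    · exact hnot 3 (by omega) (by rw [show pvPriority.getD 3 "" = s from by simp [pvPriority, c3 rfl]]; exact hs)
    · exact hnot 4 (by omega) (by rw [show pvPriority.getD 4 "" = s from by simp [pvPriority, c4 rfl]]; exact hs)

-- ===== VERDICT (by name: the statement is the Claim_ definition above) =====
theorem get_primary_source_py_spec : Claim_equal_get_primary_source_py := by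
  intro datasets _
  unfold Spec_get_primary_source_py get_primary_source_py get_primary_source_py_alt
  by_cases h0 : "us_ofac_sdn" ∈ datasets
  · rw [pvBest_eq datasets 0 (by omega) (by simpa [pvPriority] using h0) (by omega)]
    simp [pvLoopA, pvPriority, h0]
  · by_cases h1 : "eu_fsf" ∈ datasets
    · rw [pvBest_eq datasets 1 (by omega) (by simpa [pvPriority] using h1)
        (by intro j hj; interval_cases j; simpa [pvPriority] using h0)]
      simp [pvLoopA, pvPriority, h0, h1]
    · by_cases h2 : "un_sc_sanctions" ∈ datasets
      · rw [pvBest_eq datasets 2 (by omega) (by simpa [pvPriority] using h2)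
          (by intro j hj; interval_cases j <;> simp [pvPriority] <;> assumption)]
        simp [pvLoopA, pvPriority, h0, h1, h2]
      · by_cases h3 : "gb_hmt_sanctions" ∈ datasets
        · rw [pvBest_eq datasets 3 (by omega) (by simpa [pvPriority] using h3)
            (by intro j hj; interval_cases j <;> simp [pvPriority] <;> assumption)]
          simp [pvLoopA, pvPriority, h0, h1, h2, h3]
        · by_cases h4 : "opensanctions" ∈ datasets
          · rw [pvBest_eq datasets 4 (by omega) (by simpa [pvPriority] using h4)
              (by intro j hj; interval_cases j <;> simp [pvPriority] <;> assumption)]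
            simp [pvLoopA, pvPriority, h0, h1, h2, h3, h4]
          · rw [pvBest_none datasets
              (by intro j hj; interval_cases j <;> simp [pvPriority] <;> assumption)]
            simp [pvLoopA, pvPriority, h0, h1, h2, h3, h4]
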